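-- pv_equiv track=rewrite | github.com/Rhys-Alexander/Advent-of-Code | 2021/13.py | sumFoldedDots
-- ===== SOURCE A (Python) =====
-- def sumFoldedDots(inpt, folds):
--     coods, instrs = inpt
--     for fold in range(folds):
--         x_or_y, val = instrs[fold]
--         dim = 0 if x_or_y == "x" else 1
--         for i, cood in enumerate(coods):
--             if cood[dim] > val:
--                 coods[i][dim] = val - (cood[dim] - val)
--     return len(set(tuple(cood) for cood in coods))
-- ===== SOURCE B (Python) =====
-- def sumFoldedDots(inpt, folds):
--     coods, instrs = inpt
--     xs, ys = [], []
--     for axis, val in instrs[:max(0, folds)]: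
--         (xs if axis == "x" else ys).append(val)
--     pts = set()
--     for cood in coods:
--         c = list(cood)
--         for v in xs:
--             if c[0] > v:
--                 c[0] = 2 * v - c[0]
--         for v in ys:
--             if c[1] > v:
--                 c[1] = 2 * v - c[1]
--         pts.add(tuple(c))
--     return len(pts)
-- ===== Notes on version B (the rewrite author's own statement) =====
-- stated objective: alternative
-- what changed: B partitions the first `folds` instructions into per-axis fold-value lists once, then folds each point's x and y components independently in a single pass over the points, instead of A's per-instruction rescan and in-place mutation of the whole point list.
import Mathlib
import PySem

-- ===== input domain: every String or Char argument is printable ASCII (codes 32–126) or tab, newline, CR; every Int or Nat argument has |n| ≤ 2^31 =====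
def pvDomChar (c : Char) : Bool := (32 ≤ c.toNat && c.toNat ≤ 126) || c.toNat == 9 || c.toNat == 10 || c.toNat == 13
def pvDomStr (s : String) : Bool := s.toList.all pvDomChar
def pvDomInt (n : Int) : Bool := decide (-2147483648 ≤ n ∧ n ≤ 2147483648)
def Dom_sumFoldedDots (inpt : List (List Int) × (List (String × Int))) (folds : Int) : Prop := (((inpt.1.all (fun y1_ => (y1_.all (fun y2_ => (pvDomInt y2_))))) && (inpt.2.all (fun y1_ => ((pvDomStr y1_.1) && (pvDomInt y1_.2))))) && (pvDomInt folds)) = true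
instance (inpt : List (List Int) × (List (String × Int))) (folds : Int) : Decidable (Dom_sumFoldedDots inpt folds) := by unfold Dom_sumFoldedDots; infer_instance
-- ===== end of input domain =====

-- B groups the first `folds` instructions by axis once and then folds each point's two
-- coordinates independently in a single pass (alternative decomposition, same cost).
-- A mutates its input list of points in place; the equivalence proved here is about the return value only.

-- ===== PORT A =====
-- one fold instruction applied to one point (the body of A's inner loop)
def pvStepA (q : String × Int) (cood : List Int) : List Int :=
  match PySem.List.pyGet? cood (if q.1 == "x" then 0 else 1) with
  | none => cood          -- IndexError in Python; excluded by Pre_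
  | some c =>
    if c > q.2 then PySem.List.pySetD cood (if q.1 == "x" then 0 else 1) (q.2 - (c - q.2))
    else cood

def sumFoldedDots (inpt : List (List Int) × (List (String × Int))) (folds : Int) : Int :=
  let final := (PySem.List.pyRange 0 folds 1).foldl (fun cs fold =>
    match PySem.List.pyGet? inpt.2 fold with
    | none => cs          -- IndexError in Python; excluded by Pre_
    | some q => cs.map (pvStepA q)) inpt.1
  ((PySem.Set.ofList final).length : Int)

-- ===== PORT B =====
-- apply a chain of fold values to one coordinate component
def pvChain (vs : List Int) (c : Int) : Int :=
  vs.foldl (fun c v => if c > v then 2 * v - c else c) c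

-- fold one point: x-chain on component 0, then y-chain on component 1
def pvApply (xs ys : List Int) (cood : List Int) : List Int :=
  let c1 := match PySem.List.pyGet? cood 0 with
    | some c => PySem.List.pySetD cood 0 (pvChain xs c)
    | none => cood        -- IndexError in Python; excluded by Pre_
  match PySem.List.pyGet? c1 1 with
  | some c => PySem.List.pySetD c1 1 (pvChain ys c)
  | none => c1            -- IndexError in Python; excluded by Pre_

def sumFoldedDots_alt (inpt : List (List Int) × (List (String × Int))) (folds : Int) : Int :=
  let pre := PySem.List.slice inpt.2 none (some (max 0 folds))
  let xy := pre.foldl (fun (p : List Int × List Int) q =>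
      if q.1 == "x" then (p.1 ++ [q.2], p.2) else (p.1, p.2 ++ [q.2])) ([], [])
  ((inpt.1.foldl (fun (s : PySem.Set (List Int)) cood =>
      PySem.Set.add s (pvApply xy.1 xy.2 cood)) PySem.Set.empty).length : Int)

-- ===== PRECONDITION & SPEC =====
-- Pre_ excludes exactly the inputs on which Python A raises IndexError:
-- folds beyond the instruction list, or a point too short for a used fold axis.
def Pre_sumFoldedDots (inpt : List (List Int) × (List (String × Int))) (folds : Int) : Prop :=
  folds ≤ (inpt.2.length : Int) ∧
  ∀ q ∈ inpt.2.take folds.toNat, ∀ c ∈ inpt.1, (if q.1 == "x" then 1 else 2) ≤ c.length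
instance (inpt : List (List Int) × (List (String × Int))) (folds : Int) : Decidable (Pre_sumFoldedDots inpt folds) := by unfold Pre_sumFoldedDots; infer_instance

def pvWitness_sumFoldedDots : (List (List Int) × (List (String × Int))) × Int :=
  (([[6, 10], [0, 14], [9, 10]], [("y", 7), ("x", 5)]), 2)

def Spec_sumFoldedDots (inpt : List (List Int) × (List (String × Int))) (folds : Int) (out : Int) : Prop := out = sumFoldedDots_alt inpt folds
instance (inpt : List (List Int) × (List (String × Int))) (folds : Int) (out : Int) : Decidable (Spec_sumFoldedDots inpt folds out) := by unfold Spec_sumFoldedDots; infer_instance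

-- ===== CLAIM (what is proved, stated in full; the proofs are below) =====
def Claim_equal_sumFoldedDots : Prop := ∀ (inpt : List (List Int) × (List (String × Int))) (folds : Int), Dom_sumFoldedDots inpt folds → Pre_sumFoldedDots inpt folds → Spec_sumFoldedDots inpt folds (sumFoldedDots inpt folds)

-- ===== LEMMAS AND PROOFS =====

-- A's per-point effect of a whole instruction sequence
def pvRunA (qs : List (String × Int)) (cood : List Int) : List Int :=
  qs.foldl (fun c q => pvStepA q c) cood

def pvFX (qs : List (String × Int)) : List Int :=
  qs.filterMap (fun q => if q.1 == "x" then some q.2 else none)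
def pvFY (qs : List (String × Int)) : List Int :=
  qs.filterMap (fun q => if q.1 == "x" then none else some q.2)

theorem pvPart_eq (qs : List (String × Int)) (p : List Int × List Int) :
    qs.foldl (fun (p : List Int × List Int) q =>
      if q.1 == "x" then (p.1 ++ [q.2], p.2) else (p.1, p.2 ++ [q.2])) p
    = (p.1 ++ pvFX qs, p.2 ++ pvFY qs) := by
  induction qs generalizing p with
  | nil => simp [pvFX, pvFY]
  | cons q qs ih =>
    simp only [List.foldl_cons]
    by_cases h : q.1 == "x"
    · have h' : q.1 = "x" := by simpa using h
      rw [if_pos h, ih]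
      simp [pvFX, pvFY, h', List.append_assoc]
    · have h' : ¬ q.1 = "x" := by simpa using h
      rw [if_neg h, ih]
      simp [pvFX, pvFY, h', List.append_assoc]

theorem pvStepA_x (q : String × Int) (hx : (q.1 == "x") = true) (cood : List Int)
    (h0 : 0 < cood.length) :
    pvStepA q cood
      = cood.set 0 (if cood.getD 0 0 > q.2 then 2 * q.2 - cood.getD 0 0 else cood.getD 0 0) := by
  unfold pvStepA
  rw [List.getD_eq_getElem _ _ h0, if_pos hx, PySem.List.pyGet?_zero,
    List.getElem?_eq_getElem h0]
  simp only
  by_cases hc : cood[0] > q.2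
  · rw [if_pos hc, if_pos hc, PySem.List.pySetD_of_nonneg _ _ (le_refl 0)]
    simp only [Int.toNat_zero]
    congr 1
    omega
  · rw [if_neg hc, if_neg hc, List.set_getElem_self]

theorem pvStepA_y (q : String × Int) (hx : ¬ (q.1 == "x") = true) (cood : List Int)
    (h1 : 1 < cood.length) :
    pvStepA q cood
      = cood.set 1 (if cood.getD 1 0 > q.2 then 2 * q.2 - cood.getD 1 0 else cood.getD 1 0) := by
  unfold pvStepA
  have hg : PySem.List.pyGet? cood 1 = some cood[1] := by simp [h1]
  rw [List.getD_eq_getElem _ _ h1, if_neg hx, hg]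
  simp only
  by_cases hc : cood[1] > q.2
  · rw [if_pos hc, if_pos hc, PySem.List.pySetD_of_nonneg _ _ (by omega : (0:Int) ≤ 1)]
    show cood.set 1 _ = cood.set 1 _
    congr 1
    omega
  · rw [if_neg hc, if_neg hc, List.set_getElem_self]

theorem pvChain_cons (v : Int) (vs : List Int) (c : Int) :
    pvChain (v :: vs) c = pvChain vs (if c > v then 2 * v - c else c) := by
  simp [pvChain]

theorem pvApply_nil (xs ys : List Int) : pvApply xs ys [] = [] := by
  simp [pvApply, PySem.List.pyGet?, PySem.List.pyIdx?]

theorem pvApply_one (xs ys : List Int) (a : Int) : pvApply xs ys [a] = [pvChain xs a] := by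
  simp [pvApply, PySem.List.pyGet?, PySem.List.pyIdx?, PySem.List.pySetD, PySem.List.pySet?]

theorem pvApply_ge2 (xs ys : List Int) (cood : List Int) (h1 : 1 < cood.length) :
    pvApply xs ys cood
      = (cood.set 0 (pvChain xs (cood.getD 0 0))).set 1 (pvChain ys (cood.getD 1 0)) := by
  have h0 : 0 < cood.length := by omega
  rw [List.getD_eq_getElem _ _ h0, List.getD_eq_getElem _ _ h1]
  simp only [pvApply]
  rw [PySem.List.pyGet?_zero, List.getElem?_eq_getElem h0]
  simp only
  rw [PySem.List.pySetD_of_nonneg _ _ (le_refl 0)]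
  simp only [Int.toNat_zero]
  have hg : PySem.List.pyGet? (cood.set 0 (pvChain xs cood[0])) 1 = some cood[1] := by
    have hl : 1 < (cood.set 0 (pvChain xs cood[0])).length := by simpa using h1
    rw [PySem.List.pyGet?_of_nonneg _ (by omega : (0:Int) ≤ 1),
      show ((1:Int).toNat) = 1 from rfl, List.getElem?_eq_getElem hl,
      List.getElem_set_ne Nat.zero_ne_one]
  rw [hg]
  simp only
  rw [PySem.List.pySetD_of_nonneg _ _ (by omega : (0:Int) ≤ 1)]
  rfl

-- the per-point equivalence, by induction on the instruction list
theorem pvRun_eq (qs : List (String × Int)) (cood : List Int)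
    (h : ∀ q ∈ qs, (if q.1 == "x" then 1 else 2) ≤ cood.length) :
    pvRunA qs cood = pvApply (pvFX qs) (pvFY qs) cood := by
  induction qs generalizing cood with
  | nil =>
    simp only [pvRunA, List.foldl_nil, pvFX, pvFY, List.filterMap_nil]
    rcases cood with _ | ⟨a, rest⟩
    · rw [pvApply_nil]
    rcases rest with _ | ⟨b, rest⟩
    · rw [pvApply_one]; simp [pvChain]
    · rw [pvApply_ge2 _ _ _ (by simp)]
      simp [pvChain, List.getD]
  | cons q qs ih =>
    have hq := h q (List.mem_cons_self ..)
    have hrest : ∀ r ∈ qs, (if r.1 == "x" then 1 else 2) ≤ cood.length :=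
      fun r hr => h r (List.mem_cons_of_mem _ hr)
    simp only [pvRunA, List.foldl_cons] at *
    by_cases hx : (q.1 == "x") = true
    · -- x-fold: acts on component 0
      rw [if_pos hx] at hq
      have h0 : 0 < cood.length := by omega
      rw [pvStepA_x q hx cood h0]
      set r := (if cood.getD 0 0 > q.2 then 2 * q.2 - cood.getD 0 0 else cood.getD 0 0) with hr
      rw [ih _ (by intro s hs; simpa using hrest s hs)]
      have hx' : q.1 = "x" := by simpa using hx
      have hfx : pvFX (q :: qs) = q.2 :: pvFX qs := by simp [pvFX, hx']
      have hfy : pvFY (q :: qs) = pvFY qs := by simp [pvFY, hx']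
      rw [hfx, hfy]
      by_cases h1 : 1 < cood.length
      · rw [pvApply_ge2 _ _ _ (by simpa using h1), pvApply_ge2 _ _ _ h1]
        have g0 : (cood.set 0 r).getD 0 0 = r := by
          rw [List.getD_eq_getElem _ _ (by simpa using h0)]
          exact List.getElem_set_self _
        have g1 : (cood.set 0 r).getD 1 0 = cood.getD 1 0 := by
          rw [List.getD_eq_getElem _ _ (by simpa using h1), List.getD_eq_getElem _ _ h1,
            List.getElem_set_ne (by omega)]
        rw [g0, g1, List.set_set, pvChain_cons, hr]
      · rcases cood with _ | ⟨a, rest⟩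
        · simp at h0
        rcases rest with _ | ⟨b, rest⟩
        · rw [List.set_cons_zero, pvApply_one, pvApply_one, pvChain_cons]
          simp [hr, List.getD]
        · exfalso; simp at h1
    · -- y-fold: acts on component 1
      rw [if_neg hx] at hq
      have h1 : 1 < cood.length := by omega
      rw [pvStepA_y q hx cood h1]
      set r := (if cood.getD 1 0 > q.2 then 2 * q.2 - cood.getD 1 0 else cood.getD 1 0) with hr
      rw [ih _ (by intro s hs; simpa using hrest s hs)]
      have hx' : ¬ q.1 = "x" := by simpa using hx
      have hfx : pvFX (q :: qs) = pvFX qs := by simp [pvFX, hx']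
      have hfy : pvFY (q :: qs) = q.2 :: pvFY qs := by simp [pvFY, hx']
      rw [hfx, hfy]
      rw [pvApply_ge2 _ _ _ (by simpa using h1), pvApply_ge2 _ _ _ h1]
      have g0 : (cood.set 1 r).getD 0 0 = cood.getD 0 0 := by
        rw [List.getD_eq_getElem _ _ (by simpa using (by omega : 0 < cood.length)),
          List.getD_eq_getElem _ _ (by omega : 0 < cood.length),
          List.getElem_set_ne (by omega)]
      have g1 : (cood.set 1 r).getD 1 0 = r := by
        rw [List.getD_eq_getElem _ _ (by simpa using h1)]
        exact List.getElem_set_self _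
      rw [g0, g1, pvChain_cons, hr, List.set_comm _ _ Nat.one_ne_zero, List.set_set]

-- folding a map-step over the instruction list is mapping the per-point run
theorem pvFold_map (qs : List (String × Int)) (coods : List (List Int)) :
    qs.foldl (fun cs q => cs.map (pvStepA q)) coods = coods.map (pvRunA qs) := by
  induction qs generalizing coods with
  | nil => rw [show pvRunA [] = id from rfl, List.map_id, List.foldl_nil]
  | cons q qs ih => simp [ih, List.map_map, pvRunA, Function.comp]

-- A's outer range loop is a fold over the first `folds` instructions
theorem pvRange_take (instrs : List (String × Int)) (n : Nat) (hn : n ≤ instrs.length)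
    (coods : List (List Int)) :
    (PySem.List.pyRange 0 (n : Int) 1).foldl (fun cs fold =>
      match PySem.List.pyGet? instrs fold with
      | none => cs
      | some q => cs.map (pvStepA q)) coods
    = (instrs.take n).foldl (fun cs q => cs.map (pvStepA q)) coods := by
  induction n with
  | zero => simp [PySem.List.pyRange_one_eq_nil]
  | succ m ih =>
    have hm : m ≤ instrs.length := by omega
    have hmlt : m < instrs.length := by omega
    have hcast : ((m + 1 : Nat) : Int) = ((m : Int) + 1) := by push_cast; ring
    have htake : List.take (m + 1) instrs = List.take m instrs ++ [instrs[m]] := by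
      rw [List.take_add_one, List.getElem?_eq_getElem hmlt]
      rfl
    rw [hcast, PySem.List.pyRange_one_succ_right (by positivity), List.foldl_append,
      ih hm, htake, List.foldl_append]
    simp only [List.foldl_cons, List.foldl_nil]
    simp [PySem.List.pyGet?_natCast, List.getElem?_eq_getElem hmlt]

-- ===== VERDICT (by name: the statement is the Claim_ definition above) =====
theorem sumFoldedDots_spec : Claim_equal_sumFoldedDots := by
  intro inpt folds _ hpre
  obtain ⟨hle, hlen⟩ := hpre
  unfold Spec_sumFoldedDots sumFoldedDots sumFoldedDots_alt
  simp only
  rw [pvPart_eq]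
  simp only [List.nil_append]
  -- B's slice is take folds.toNat
  have hslice : PySem.List.slice inpt.2 none (some (max 0 folds)) = inpt.2.take folds.toNat := by
    rw [PySem.List.slice_to _ (le_max_left 0 folds)]
    congr 1
    omega
  rw [hslice]
  -- A's loop rewritten
  have hrange : (PySem.List.pyRange 0 folds 1).foldl (fun cs fold =>
      match PySem.List.pyGet? inpt.2 fold with
      | none => cs
      | some q => cs.map (pvStepA q)) inpt.1
      = (inpt.2.take folds.toNat).foldl (fun cs q => cs.map (pvStepA q)) inpt.1 := by
    by_cases hneg : folds ≤ 0
    · rw [PySem.List.pyRange_one_eq_nil (by omega), Int.toNat_of_nonpos hneg]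
      simp
    · have hpos : 0 < folds := by omega
      have hf : folds = (folds.toNat : Int) := by omega
      rw [hf]
      exact pvRange_take inpt.2 folds.toNat (by omega) inpt.1
  rw [hrange, pvFold_map]
  -- per-point agreement on every member
  have hmap : inpt.1.map (pvRunA (inpt.2.take folds.toNat))
      = inpt.1.map (pvApply (pvFX (inpt.2.take folds.toNat)) (pvFY (inpt.2.take folds.toNat))) :=
    List.map_congr_left (fun c hc => pvRun_eq _ c (fun q hq => hlen q hq c hc))
  rw [hmap]
  -- B's set-building fold is Set.ofList of the mapped list
  congr 1
  rw [show (inpt.1.foldl (fun (s : PySem.Set (List Int)) cood =>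
      PySem.Set.add s (pvApply (pvFX (inpt.2.take folds.toNat)) (pvFY (inpt.2.take folds.toNat)) cood))
      PySem.Set.empty)
    = ((inpt.1.map (pvApply (pvFX (inpt.2.take folds.toNat)) (pvFY (inpt.2.take folds.toNat)))).foldl
        PySem.Set.add PySem.Set.empty) from (List.foldl_map).symm]
  rfl
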